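-- pv_equiv track=rewrite | github.com/AILAB-CEFET-RJ/nerdd | GliNER/AutoIterativo/separado/parte7_treino.py | _safe_ws_tokenize_with_char_spans
-- ===== SOURCE A (Python) =====
-- def _safe_ws_tokenize_with_char_spans(text: str):
--     """Tokeniza por espaços e retorna (tokens, spans), mesmo para string vazia."""
--     if not isinstance(text, str):
--         text = "" if text is None else str(text)
--     n = len(text)
--     tokens, spans = [], []
--     i = 0
--     while i < n:
--         while i < n and text[i].isspace():
--             i += 1
--         if i >= n:
--             break
--         start = i
--         while i < n and not text[i].isspace():
--             i += 1
--         end = i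
--         tokens.append(text[start:end])
--         spans.append((start, end))
--     return tokens, spans
-- ===== SOURCE B (Python) =====
-- def _runs(text):
--     """Run-length encode text by the str.isspace() predicate: list of (is_ws, length)."""
--     runs = []
--     i, n = 0, len(text)
--     while i < n:
--         k = text[i].isspace()
--         j = i + 1
--         while j < n and text[j].isspace() == k:
--             j += 1
--         runs.append((k, j - i))
--         i = j
--     return runs
--
--
-- def _safe_ws_tokenize_with_char_spans(text: str):
--     """Tokeniza por espaços e retorna (tokens, spans), mesmo para string vazia."""
--     if not isinstance(text, str):
--         text = "" if text is None else str(text)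
--     tokens, spans = [], []
--     offset = 0
--     for is_ws, length in _runs(text):
--         if not is_ws:
--             tokens.append(text[offset:offset + length])
--             spans.append((offset, offset + length))
--         offset += length
--     return tokens, spans
-- ===== Notes on version B (the rewrite author's own statement) =====
-- stated objective: alternative
-- what changed: Replaces A's interleaved skip-whitespace/consume-token index loops with a two-phase decomposition: first run-length encode the text by the isspace predicate, then fold over the runs with a running offset, emitting a token and span for each non-whitespace run.
import Mathlib
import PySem

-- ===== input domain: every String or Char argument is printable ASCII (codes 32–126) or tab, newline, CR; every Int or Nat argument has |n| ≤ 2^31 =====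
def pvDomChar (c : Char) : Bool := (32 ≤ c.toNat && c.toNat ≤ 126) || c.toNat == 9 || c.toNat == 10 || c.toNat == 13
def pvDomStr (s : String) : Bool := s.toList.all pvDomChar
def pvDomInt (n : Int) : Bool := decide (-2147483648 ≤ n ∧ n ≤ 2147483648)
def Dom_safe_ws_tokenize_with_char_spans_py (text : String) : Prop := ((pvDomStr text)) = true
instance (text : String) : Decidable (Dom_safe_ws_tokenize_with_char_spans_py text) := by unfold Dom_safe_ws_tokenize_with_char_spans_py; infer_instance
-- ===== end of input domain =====

-- B replaces A's interleaved skip-ws/consume-token index loops by a two-phase decomposition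
-- (run-length encode by isspace, then fold over runs with a running offset); same cost, alternative structure.

-- ===== PORT A =====
-- inner `while i < n and text[i].isspace(): i += 1`
-- (fuel, always started at n - i, only totalizes the loop; the guard i < n keeps the
--  index in range, so `cs.getD i ' '` is Python's text[i] exactly)
def pvAWhile1Go (cs : List Char) (n : Nat) : Nat → Nat → Nat
  | 0, i => i
  | fuel + 1, i =>
    if i < n ∧ PySem.Chars.isspace (cs.getD i ' ') = true then pvAWhile1Go cs n fuel (i + 1) else i

def pvAWhile1 (cs : List Char) (n i : Nat) : Nat := pvAWhile1Go cs n (n - i) i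

-- inner `while i < n and not text[i].isspace(): i += 1`
def pvAWhile2Go (cs : List Char) (n : Nat) : Nat → Nat → Nat
  | 0, i => i
  | fuel + 1, i =>
    if i < n ∧ PySem.Chars.isspace (cs.getD i ' ') = false then pvAWhile2Go cs n fuel (i + 1) else i

def pvAWhile2 (cs : List Char) (n i : Nat) : Nat := pvAWhile2Go cs n (n - i) i

-- outer `while i < n:` loop of A, with the accumulators tokens/spans
-- (fuel n - i totalizes it: i strictly increases on every iteration)
def pvALoopGo (cs : List Char) (n : Nat) :
    Nat → Nat → List String → List (Int × Int) → List String × List (Int × Int)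
  | 0, _, tokens, spans => (tokens, spans)
  | fuel + 1, i, tokens, spans =>
    if i < n then
      let i1 := pvAWhile1 cs n i
      if i1 ≥ n then (tokens, spans)   -- `if i >= n: break`
      else
        let i2 := pvAWhile2 cs n i1
        -- text[start:end] with 0 ≤ start ≤ end ≤ n is exactly this take/drop slice
        pvALoopGo cs n fuel i2 (tokens ++ [String.mk ((cs.drop i1).take (i2 - i1))])
          (spans ++ [((i1 : Int), (i2 : Int))])
    else (tokens, spans)

def safe_ws_tokenize_with_char_spans_py (text : String) : List String × (List (Int × Int)) :=
  let cs := text.toList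
  pvALoopGo cs cs.length cs.length 0 [] []

-- ===== PORT B =====
-- Source B's _runs: run-length encode by the isspace predicate (head key, then the
-- inner `while j < n and text[j].isspace() == k` consumes the rest of the run);
-- fuel cs.length totalizes it: each step consumes at least the head character
def pvRunsGo : Nat → List Char → List (Bool × Nat)
  | 0, _ => []
  | _, [] => []
  | fuel + 1, c :: rest =>
    let k := PySem.Chars.isspace c
    let run := rest.takeWhile (fun d => PySem.Chars.isspace d == k)
    (k, run.length + 1) :: pvRunsGo fuel (rest.dropWhile (fun d => PySem.Chars.isspace d == k))

def pvRuns (cs : List Char) : List (Bool × Nat) := pvRunsGo cs.length cs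

-- Source B's `for is_ws, length in _runs(text):` fold with the running offset
def pvBLoop (cs : List Char) (runs : List (Bool × Nat)) (off : Nat)
    (tokens : List String) (spans : List (Int × Int)) : List String × List (Int × Int) :=
  match runs with
  | [] => (tokens, spans)
  | (isws, len) :: rs =>
    if isws then pvBLoop cs rs (off + len) tokens spans
    else
      pvBLoop cs rs (off + len)
        (tokens ++ [String.mk ((cs.drop off).take len)])   -- text[offset:offset+length]
        (spans ++ [((off : Int), ((off + len : Nat) : Int))])

def safe_ws_tokenize_with_char_spans_py_alt (text : String) : List String × (List (Int × Int)) :=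
  let cs := text.toList
  pvBLoop cs (pvRuns cs) 0 [] []

-- ===== PRECONDITION & SPEC =====
def Spec_safe_ws_tokenize_with_char_spans_py (text : String) (out : List String × (List (Int × Int))) : Prop := out = safe_ws_tokenize_with_char_spans_py_alt text
instance (text : String) (out : List String × (List (Int × Int))) : Decidable (Spec_safe_ws_tokenize_with_char_spans_py text out) := by unfold Spec_safe_ws_tokenize_with_char_spans_py; infer_instance

-- ===== CLAIM (what is proved, stated in full; the proofs are below) =====
def Claim_equal_safe_ws_tokenize_with_char_spans_py : Prop := ∀ (text : String), Dom_safe_ws_tokenize_with_char_spans_py text → Spec_safe_ws_tokenize_with_char_spans_py text (safe_ws_tokenize_with_char_spans_py text)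

-- ===== LEMMAS AND PROOFS =====

theorem pvDW (p : Char → Bool) (l : List Char) :
    l.dropWhile p = l.drop (l.takeWhile p).length := by
  induction l with
  | nil => rfl
  | cons c rest ih =>
    by_cases h : p c
    · simp [h, ih]
    · simp [h]

theorem pvGetD_drop (cs : List Char) (i : Nat) (hi : i < cs.length) :
    cs.getD i ' ' = cs[i] := by
  rw [List.getD_eq_getElem?_getD, List.getElem?_eq_getElem hi]; rfl

-- while-loop characterisations via takeWhile (fuel only needs to dominate n - i)
theorem pvAWhile1Go_eq (cs : List Char) : ∀ (fuel i : Nat), cs.length - i ≤ fuel →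
    pvAWhile1Go cs cs.length fuel i
      = i + ((cs.drop i).takeWhile (fun d => PySem.Chars.isspace d == true)).length := by
  intro fuel
  induction fuel with
  | zero =>
    intro i hf
    rw [pvAWhile1Go, List.drop_eq_nil_iff.mpr (by omega)]
    simp
  | succ fuel ih =>
    intro i hf
    rw [pvAWhile1Go]
    by_cases hi : i < cs.length
    · have hd : cs.drop i = cs[i] :: cs.drop (i + 1) := List.drop_eq_getElem_cons hi
      by_cases hsp : PySem.Chars.isspace cs[i] = true
      · rw [if_pos ⟨hi, by rw [pvGetD_drop cs i hi]; exact hsp⟩, ih (i + 1) (by omega)]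
        rw [hd, List.takeWhile_cons]
        simp only [hsp, beq_self_eq_true, if_true, List.length_cons]
        omega
      · rw [if_neg (by rw [pvGetD_drop cs i hi]; exact fun h => hsp h.2)]
        rw [hd, List.takeWhile_cons]
        simp [Bool.not_eq_true] at hsp
        simp [hsp]
    · rw [if_neg (fun h => hi h.1), List.drop_eq_nil_iff.mpr (by omega)]
      simp

theorem pvAWhile1_eq (cs : List Char) (i : Nat) :
    pvAWhile1 cs cs.length i
      = i + ((cs.drop i).takeWhile (fun d => PySem.Chars.isspace d == true)).length :=
  pvAWhile1Go_eq cs (cs.length - i) i (by omega)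

theorem pvAWhile2Go_eq (cs : List Char) : ∀ (fuel i : Nat), cs.length - i ≤ fuel →
    pvAWhile2Go cs cs.length fuel i
      = i + ((cs.drop i).takeWhile (fun d => PySem.Chars.isspace d == false)).length := by
  intro fuel
  induction fuel with
  | zero =>
    intro i hf
    rw [pvAWhile2Go, List.drop_eq_nil_iff.mpr (by omega)]
    simp
  | succ fuel ih =>
    intro i hf
    rw [pvAWhile2Go]
    by_cases hi : i < cs.length
    · have hd : cs.drop i = cs[i] :: cs.drop (i + 1) := List.drop_eq_getElem_cons hi
      by_cases hsp : PySem.Chars.isspace cs[i] = false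
      · rw [if_pos ⟨hi, by rw [pvGetD_drop cs i hi]; exact hsp⟩, ih (i + 1) (by omega)]
        rw [hd, List.takeWhile_cons]
        simp only [hsp, beq_self_eq_true, if_true, List.length_cons]
        omega
      · rw [if_neg (by rw [pvGetD_drop cs i hi]; exact fun h => hsp h.2)]
        rw [hd, List.takeWhile_cons]
        simp [Bool.not_eq_false] at hsp
        simp [hsp]
    · rw [if_neg (fun h => hi h.1), List.drop_eq_nil_iff.mpr (by omega)]
      simp

theorem pvAWhile2_eq (cs : List Char) (i : Nat) :
    pvAWhile2 cs cs.length i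
      = i + ((cs.drop i).takeWhile (fun d => PySem.Chars.isspace d == false)).length :=
  pvAWhile2Go_eq cs (cs.length - i) i (by omega)

-- the skip loop stops on a non-space (or at the end)
theorem pvAWhile1Go_stop (cs : List Char) : ∀ (fuel i : Nat), cs.length - i ≤ fuel →
    ¬ (pvAWhile1Go cs cs.length fuel i < cs.length
        ∧ PySem.Chars.isspace (cs.getD (pvAWhile1Go cs cs.length fuel i) ' ') = true) := by
  intro fuel
  induction fuel with
  | zero =>
    intro i hf
    rw [pvAWhile1Go]
    exact fun h => by omega
  | succ fuel ih =>
    intro i hf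
    rw [pvAWhile1Go]
    by_cases h : i < cs.length ∧ PySem.Chars.isspace (cs.getD i ' ') = true
    · rw [if_pos h]
      exact ih (i + 1) (by omega)
    · rw [if_neg h]
      exact h

theorem pvAWhile1_stop (cs : List Char) (i : Nat) :
    ¬ (pvAWhile1 cs cs.length i < cs.length
        ∧ PySem.Chars.isspace (cs.getD (pvAWhile1 cs cs.length i) ' ') = true) :=
  pvAWhile1Go_stop cs (cs.length - i) i (by omega)

theorem pvAWhile1_idem (cs : List Char) (j : Nat)
    (h : ¬ (j < cs.length ∧ PySem.Chars.isspace (cs.getD j ' ') = true)) :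
    pvAWhile1 cs cs.length j = j := by
  rw [pvAWhile1]
  by_cases hj : j < cs.length
  · have : cs.length - j = (cs.length - j - 1) + 1 := by omega
    rw [this, pvAWhile1Go, if_neg h]
  · have : cs.length - j = 0 := by omega
    rw [this, pvAWhile1Go]

-- pvRunsGo is fuel-irrelevant above the list length
theorem pvRunsGo_fuel : ∀ (fuel : Nat) (l : List Char), l.length ≤ fuel →
    pvRunsGo fuel l = pvRuns l := by
  intro fuel
  induction fuel using Nat.strong_induction_on with
  | _ fuel IH =>
    intro l hf
    match l with
    | [] =>
      match fuel with
      | 0 => rfl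
      | _ + 1 => rfl
    | c :: rest =>
      match fuel with
      | 0 => simp at hf
      | f + 1 =>
        have hdrop := List.length_dropWhile_le (fun d => PySem.Chars.isspace d == PySem.Chars.isspace c) rest
        simp only [List.length_cons] at hf
        conv_rhs => rw [pvRuns]
        simp only [List.length_cons]
        rw [pvRunsGo, pvRunsGo]
        rw [IH f (by omega) _ (by omega), IH rest.length (by omega) _ (by omega)]

-- one step of pvRuns, phrased on a cons cell
theorem pvRuns_cons (c : Char) (rest : List Char) :
    pvRuns (c :: rest)
      = (PySem.Chars.isspace c,
          ((c :: rest).takeWhile (fun d => PySem.Chars.isspace d == PySem.Chars.isspace c)).length)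
        :: pvRuns ((c :: rest).dropWhile (fun d => PySem.Chars.isspace d == PySem.Chars.isspace c)) := by
  have hdrop := List.length_dropWhile_le (fun d => PySem.Chars.isspace d == PySem.Chars.isspace c) rest
  rw [pvRuns]
  simp only [List.length_cons]
  rw [pvRunsGo]
  rw [pvRunsGo_fuel rest.length _ (by omega)]
  simp [List.takeWhile_cons, List.dropWhile_cons]

theorem pvMain (m : Nat) : ∀ (cs : List Char) (fuel i : Nat) (toks : List String) (sps : List (Int × Int)),
    cs.length - i = m → m ≤ fuel →
    pvALoopGo cs cs.length fuel i toks sps = pvBLoop cs (pvRuns (cs.drop i)) i toks sps := by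
  induction m using Nat.strong_induction_on with
  | _ m IH =>
    intro cs fuel i toks sps hm hfuel
    match fuel with
    | 0 =>
      rw [List.drop_eq_nil_iff.mpr (by omega)]
      rfl
    | fuel + 1 =>
    by_cases hi : i < cs.length
    case neg =>
      rw [List.drop_eq_nil_iff.mpr (by omega)]
      rw [pvALoopGo, if_neg hi]
      rfl
    case pos =>
    have hd : cs.drop i = cs[i] :: cs.drop (i + 1) := List.drop_eq_getElem_cons hi
    have hlen : (cs.drop i).length = cs.length - i := List.length_drop ..
    have hruns : pvRuns (cs.drop i)
        = (PySem.Chars.isspace cs[i],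
            ((cs.drop i).takeWhile (fun d => PySem.Chars.isspace d == PySem.Chars.isspace cs[i])).length)
          :: pvRuns (cs.drop (i + ((cs.drop i).takeWhile (fun d => PySem.Chars.isspace d == PySem.Chars.isspace cs[i])).length)) := by
      conv_lhs => rw [hd, pvRuns_cons]
      rw [← hd, pvDW, List.drop_drop]
    by_cases hk : PySem.Chars.isspace cs[i] = true
    case pos =>
      rw [hk] at hruns
      set t1 := ((cs.drop i).takeWhile (fun d => PySem.Chars.isspace d == true)).length with ht1
      have ht1pos : 1 ≤ t1 := by
        rw [ht1, hd, List.takeWhile_cons]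
        simp [hk]
      have hW1 : pvAWhile1 cs cs.length i = i + t1 := pvAWhile1_eq cs i
      rw [hruns, pvBLoop, if_pos rfl]
      -- A's outer iteration first skips the whitespace run; restarting at i + t1 is the same
      have hskip : pvALoopGo cs cs.length (fuel + 1) i toks sps
          = pvALoopGo cs cs.length (fuel + 1) (i + t1) toks sps := by
        have hstop := pvAWhile1_stop cs i
        rw [hW1] at hstop
        by_cases hb : cs.length ≤ i + t1
        · conv_rhs => rw [pvALoopGo, if_neg (show ¬ i + t1 < cs.length by omega)]
          conv_lhs => rw [pvALoopGo, if_pos hi]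
          rw [hW1, if_pos (show i + t1 ≥ cs.length from hb)]
        · conv_lhs => rw [pvALoopGo, if_pos hi]
          conv_rhs => rw [pvALoopGo, if_pos (show i + t1 < cs.length by omega)]
          rw [hW1, pvAWhile1_idem cs (i + t1) (by rw [pvGetD_drop cs (i + t1) (by omega)] at hstop ⊢; exact hstop)]
      rw [hskip]
      exact IH (cs.length - (i + t1)) (by omega) cs (fuel + 1) (i + t1) toks sps rfl (by omega)
    case neg =>
      have hk' : PySem.Chars.isspace cs[i] = false := by
        rcases Bool.eq_false_or_eq_true (PySem.Chars.isspace cs[i]) with h' | h'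
        · exact absurd h' hk
        · exact h'
      rw [hk'] at hruns
      set t2 := ((cs.drop i).takeWhile (fun d => PySem.Chars.isspace d == false)).length with ht2
      have ht2pos : 1 ≤ t2 := by
        rw [ht2, hd, List.takeWhile_cons]
        simp [hk']
      have hW1 : pvAWhile1 cs cs.length i = i := by
        rw [pvAWhile1_eq cs i, hd, List.takeWhile_cons]
        simp [hk']
      have hW2 : pvAWhile2 cs cs.length i = i + t2 := pvAWhile2_eq cs i
      rw [hruns, pvBLoop, if_neg (by simp)]
      conv_lhs => rw [pvALoopGo, if_pos hi]
      rw [hW1]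
      rw [if_neg (show ¬ i ≥ cs.length by omega)]
      rw [hW2]
      rw [IH (cs.length - (i + t2)) (by omega) cs fuel (i + t2) _ _ rfl (by omega)]
      simp only [Nat.add_sub_cancel_left]

-- ===== VERDICT (by name: the statement is the Claim_ definition above) =====
theorem safe_ws_tokenize_with_char_spans_py_spec : Claim_equal_safe_ws_tokenize_with_char_spans_py := by
  intro text _
  unfold Spec_safe_ws_tokenize_with_char_spans_py
  unfold safe_ws_tokenize_with_char_spans_py safe_ws_tokenize_with_char_spans_py_alt
  have := pvMain (text.toList.length) text.toList text.toList.length 0 [] [] (by omega) (by omega)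
  simpa using this
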